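/- GENERATED by mk_final_copies.py from the proof of the farm's unit `vorbis_decode_packet_rest.3b` (farm:vorbis_decode_packet_rest.3b.1: Lemmas.lean) as the
   re-elaboration sweep compiled it — do not edit. -/
import Asan.CheckWalk
import Vorbis.Spec.PacketRestFrame
import Vorbis.Spec.PacketRestTest
import Vorbis.Spec.ReaderLemmas
import Vorbis.Spec.CodebookCarry
import Vorbis.Spec.Units.vorbis_decode_packet_rest_3b

/-
  THE LEMMAS OF UNIT vorbis_decode_packet_rest.3b (the inline DECODE_RAW of segment .3, 0x110f3b → 0x110fc2).
  The bit-level lemmas (`low16_zext` … `result_sign`) are those of the farm's proof of codebook_decode_start (the same code shape).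
  The walk `decode_raw` is NEW (agent H-20, from the set-up the parent's worker left and the farm's proof of codebook_decode_start).
  Section Pure is ADAPTED from the Lemmas.lean of the worker of the parent unit vorbis_decode_packet_rest.3 (attempt 1, against freeze-5): the moved
  declarations (`seg3Wins`, `Head3Slots`, `At3Mid`, `seg3Wins_through_callee`, `seg3Wins_push`, `Head3Slots.through`, the labels
  `at_110f3b` / `at_110fc2`) are the tree's (Vorbis/Spec/PacketRest3.lean). Of the worker's own carry lemmas only `read_kept`,
  `segWins_storeOK`, `seg3_inv_step` (`DecodeInv` after the segment's stores: the callee's precondition) and `config_eqOn` are here.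
-/
open X86 X86.User Asan Vorbis Vorbis.Spec Vorbis.Spec.vorbis_decode_packet_rest

set_option maxRecDepth 4000
set_option maxHeartbeats 4000000

namespace Vorbis.Spec.vorbis_decode_packet_rest_3b
section Pure
variable {u₀ : State} {others : List Obj} {frames : List (Nat × FrameLayout)} {len : Nat} {Ar : Arena}
  {stored room : Int} {mode : Nat} {ysz : Nat → Nat} {u : State} {ret : Word} {ls : Int} {v w : State}

/-- **A read of the own frame off the segment's stack windows is unchanged**: above `[rsp + 0x3c]`, or the slots `[rsp + 8]`,
`[rsp + 0x20 .. 0x2c)` between the windows. -/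
theorem read_kept (hst : Stable u₀ others frames len Ar stored room mode ysz u ret ls v)
    (hsame : Mem.SameExcept (seg3Wins u) v.mem w.mem) (a : Word) (n : Nat)
    (h1 : (u.reg .rsp).toNat - 2940 ≤ a.toNat ∨
      ((u.reg .rsp).toNat - 2992 ≤ a.toNat ∧ a.toNat + n ≤ (u.reg .rsp).toNat - 2984) ∨
      ((u.reg .rsp).toNat - 2968 ≤ a.toNat ∧ a.toNat + n ≤ (u.reg .rsp).toNat - 2956))
    (h2 : a.toNat + n ≤ 0x800030) :
    w.mem.readLE a n = v.mem.readLE a n := by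
  have hoff := hst.inv.objOff
  simp only [voff] at hoff
  have hroom := hst.entry.room
  have htop := hst.entry.top
  simp only [Vorbis.conv_stackLo, Vorbis.conv_stackHi] at hroom htop
  apply hsame.readLE a n (by omega)
  intro s hs
  have := seg3Wins_mem hs
  omega

/-- **Every window of the segment is a decode-time store** (`StoreOK`): the stack windows are off every allocated block, the
windows of `*f` lie in its decode-time holes. -/
theorem segWins_storeOK (hst : Stable u₀ others frames len Ar stored room mode ysz u ret ls v) (s : Span)
    (hs : s ∈ seg3Wins u) : StoreOK (RunBlk Ar len) v.mem (fOf u) s := by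
  have hroom := hst.entry.room
  have htop := hst.entry.top
  simp only [Vorbis.conv_stackLo, Vorbis.conv_stackHi] at hroom htop
  have hoffs := hst.inv.offStack
  rcases seg3Wins_mem hs with h | h | h | h | h | h | h | h
  · apply StoreOK.off
    intro B hB
    have := hoffs B hB
    omega
  · apply StoreOK.off
    intro B hB
    have := hoffs B hB
    omega
  · apply StoreOK.off
    intro B hB
    have := hoffs B hB
    omega
  all_goals
    apply StoreOK.hole
    unfold InHole
    omega

/-- **The decode-time invariant after the segment's stores**, given `Bits` of the new memory (a callee's post, or
`Bits.store_valid_bits` / `Bits.store_other` for the inline DECODE's own stores). -/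
theorem seg3_inv_step (hst : Stable u₀ others frames len Ar stored room mode ysz u ret ls v)
    (hsame : Mem.SameExcept (seg3Wins u) v.mem w.mem) (hun : ShadowUntouched v.mem w.mem)
    (hbits : Bits (RunBlk Ar len) len w.mem (fOf u)) :
    DecodeInv others (framesIn frames u) len Ar stored room ysz w.mem (fOf u) := by
  have hinv := hst.inv
  have hoff := hinv.objOff
  have hfin := hinv.fb.vorbis.bits.OBR
  simp only [voff] at hoff hfin
  have hroom := hst.entry.room
  have htop := hst.entry.top
  simp only [Vorbis.conv_stackLo, Vorbis.conv_stackHi] at hroom htop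
  have henv : Env (RunBlk Ar len) (Asan.Live (stackObjs (framesIn frames u) ++ others)) w.mem := hinv.fb.env.eqOn hun
  have hado : ADO Ar others w.mem (fOf u) := by
    apply hinv.fb.ado.frame_stores hsame (by simp only [voff]; omega)
    · intro s hs
      have := seg3Wins_mem hs
      omega
    · intro s hs
      have := seg3Wins_mem hs
      omega
  have h7 : Mdct.M7Range w.mem (fOf u) := by
    apply hinv.fb.vorbis.buffers.M7.transfer
    apply ObjEq.of_sameExcept hsame
    · intro x hx
      simp only [Mdct.M7Range.wins, List.mem_cons, List.mem_nil_iff, or_false] at hx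
      rcases hx with rfl | rfl <;> simp only [] <;> omega
    · intro x hx s hs
      have := seg3Wins_mem hs
      simp only [Mdct.M7Range.wins, List.mem_cons, List.mem_nil_iff, or_false] at hx
      rcases hx with rfl | rfl <;> simp only [] <;> omega
  have hw1 : W1 w.mem (fOf u) := by
    apply hinv.fb.vorbis.w1.transfer
    apply ObjEq.of_sameExcept hsame
    · intro x hx
      simp only [W1.wins, List.mem_cons, List.mem_nil_iff, or_false] at hx
      rcases hx with rfl | rfl <;> simp only [] <;> omega
    · intro x hx s hs
      have := seg3Wins_mem hs
      simp only [W1.wins, List.mem_cons, List.mem_nil_iff, or_false] at hx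
      rcases hx with rfl | rfl <;> simp only [] <;> omega
  exact hinv.frame_stores hsame (segWins_storeOK hst) henv hado (fun _ => hbits) (fun _ => h7) (fun _ => hw1)

/-- **The configuration part of `*f` (`[f + 144, f + 1484)`: block sizes, the pointers, the mode records, `finalY[]`) reads the
same after the segment's stores.** -/
theorem config_eqOn (hst : Stable u₀ others frames len Ar stored room mode ysz u ret ls v)
    (hsame : Mem.SameExcept (seg3Wins u) v.mem w.mem) : Mem.EqOn (fOf u + 144) (fOf u + 1484) v.mem w.mem := by
  have hoff := hst.inv.objOff
  simp only [voff] at hoff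
  have hroom := hst.entry.room
  have htop := hst.entry.top
  simp only [Vorbis.conv_stackLo, Vorbis.conv_stackHi] at hroom htop
  apply hsame.eqOn
  intro s hs
  have := seg3Wins_mem hs
  omega

end Pure

/-- The 16-bit round trip of `movzx r12d, word ; movsx r13d, r12w`. -/
theorem low16_zext (y : BitVec 16) : BitVec.setWidth 16 (BitVec.zeroExtend 32 y) = y := by
  bv_decide

/-- The sign of the 32-bit sign extension of a 16-bit value is its own. -/
theorem msb_sext32 (y : BitVec 16) : (BitVec.signExtend 32 y).msb = y.msb := by
  bv_decide

/-- A non-negative 16-bit value: sign extension is zero extension (64 bits). -/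
theorem sext64_nonneg (y : BitVec 16) (h : y.msb = false) : BitVec.signExtend 64 y = BitVec.zeroExtend 64 y := by
  bv_decide

/-- A non-negative 16-bit value: sign extension is zero extension (32 bits). -/
theorem sext32_nonneg (y : BitVec 16) (h : y.msb = false) : BitVec.signExtend 32 y = BitVec.zeroExtend 32 y := by
  bv_decide

/-- **The entry `fast_huffman[k]` as the machine forms it** (`movzx r12d, word [..] ; movsx r13d, r12w ; test r13d, r13d ; js`,
then `movsx r12, r12w`): `H` is the 16-bit load. Sign bit clear: the entry is `H < 32768`, both sign extensions are `H`.
Sign bit set: the entry is negative, and r13d is its two's complement. -/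
theorem fast_entry (H : Nat) (hH : H < 65536) :
    ((BitVec.signExtend 32 (BitVec.setWidth 16 (BitVec.zeroExtend 32 (BitVec.ofNat 16 H)))).msb = false →
      H < 32768 ∧ sint16 H = (H : Int) ∧
      Word.ofBV (BitVec.signExtend 64 (BitVec.setWidth 16 (BitVec.zeroExtend 32 (BitVec.ofNat 16 H)))) = addr H ∧
      Word.ofBV (BitVec.signExtend 32 (BitVec.setWidth 16 (BitVec.zeroExtend 32 (BitVec.ofNat 16 H)))) = addr H) ∧
    ((BitVec.signExtend 32 (BitVec.setWidth 16 (BitVec.zeroExtend 32 (BitVec.ofNat 16 H)))).msb = true →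
      32768 ≤ H) := by
  rw [low16_zext, msb_sext32]
  have hy : (BitVec.ofNat 16 H).toNat = H := by
    rw [BitVec.toNat_ofNat]
    omega
  have hm : (BitVec.ofNat 16 H).msb = decide (32768 ≤ H) := by
    rw [BitVec.msb_eq_decide, hy]
  constructor
  · intro h
    rw [hm] at h
    have hlt : H < 32768 := by
      simpa using h
    have hm' : (BitVec.ofNat 16 H).msb = false := by
      rw [hm]
      simpa using hlt
    refine ⟨hlt, ?_, ?_, ?_⟩
    · unfold sint16
      rw [if_pos hlt]
    · rw [sext64_nonneg _ hm', ofBV_eq_addr _ (Nat.le_refl _), BitVec.toNat_setWidth, hy]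
      congr 1
      omega
    · rw [sext32_nonneg _ hm', ofBV_eq_addr _ (by decide), BitVec.toNat_setWidth, hy]
      congr 1
      omega
  · intro h
    rw [hm] at h
    simpa using h



/-- **`valid_bits -= len` did not go negative** (`sub eax, ebp ; js`, sign flag clear): with `valid_bits ∈ [−1, 32]` (V1) and a
length byte, the stored difference is in `[0, 32]`: V1 again. A closed bit-vector fact. -/
theorem vb_sub_ok (M : BitVec 32) (L : BitVec 8) (h1 : (4294967295#32).sle M = true) (h2 : M.sle 32#32 = true)
    (hs : (M - BitVec.zeroExtend 32 (BitVec.setWidth 8 (BitVec.zeroExtend 32 L))).msb = false) :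
    (4294967295#32).sle (M - BitVec.zeroExtend 32 (BitVec.setWidth 8 (BitVec.zeroExtend 32 L))) = true ∧
      (M - BitVec.zeroExtend 32 (BitVec.setWidth 8 (BitVec.zeroExtend 32 L))).sle 32#32 = true := by
  bv_decide

/-- The signed form of `vb_sub_ok`, as `Bits.store_valid_bits` wants it. -/
theorem vb_sub_V1 (M : BitVec 32) (L : BitVec 8) (hM : -1 ≤ M.toInt ∧ M.toInt ≤ 32)
    (hs : (M - BitVec.zeroExtend 32 (BitVec.setWidth 8 (BitVec.zeroExtend 32 L))).msb = false) :
    -1 ≤ (M - BitVec.zeroExtend 32 (BitVec.setWidth 8 (BitVec.zeroExtend 32 L))).toInt ∧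
      (M - BitVec.zeroExtend 32 (BitVec.setWidth 8 (BitVec.zeroExtend 32 L))).toInt ≤ 32 := by
  have e1 : (4294967295#32).toInt = -1 := by decide
  have e2 : (32#32).toInt = 32 := by decide
  have h1 : (4294967295#32).sle M = true := by
    rw [BitVec.sle_eq_decide, e1]
    exact decide_eq_true hM.1
  have h2 : M.sle 32#32 = true := by
    rw [BitVec.sle_eq_decide, e2]
    exact decide_eq_true hM.2
  obtain ⟨k1, k2⟩ := vb_sub_ok M L h1 h2 hs
  rw [BitVec.sle_eq_decide, e1] at k1
  rw [BitVec.sle_eq_decide, e2] at k2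
  exact ⟨of_decide_eq_true k1, of_decide_eq_true k2⟩

/-- The 32-bit load of `valid_bits`, as a signed bit vector, is the field. -/
theorem vb_toInt (mem : Mem) (f m : Nat) (h : mem.readLE (addr f + 1768) 4 = m) :
    (BitVec.ofNat 32 m).toInt = stb_vorbis.valid_bits mem f := by
  have hlt : m < 2 ^ 32 := by
    rw [← h]
    exact Mem.readLE_lt' mem _ 4
  rw [BitVec.toInt_eq_toNat_cond, BitVec.toNat_ofNat, Nat.mod_eq_of_lt hlt]
  rcases Vorbis.Spec.PrepHuffman.vb_cases mem f m h with ⟨h1, h2⟩ | ⟨h1, h2, h3⟩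
  · rw [h2]
    split <;> omega
  · rw [h3]
    split <;> omega


/-- **`mov r13d, eax ; test r13d, r13d ; jns`** on a callee's `int` result `z`: the copy is the same `int`; sign bit clear:
`z ≥ 0`; sign bit set: `z < 0`, and if `z = −1` the low half is `FFFFFFFFH`. -/
theorem result_sign (z : Word) :
    argInt (Word.ofBV (Word.part .w32 z)) = argInt z ∧
    ((Word.part .w32 z).msb = false → 0 ≤ argInt z) ∧
    ((Word.part .w32 z).msb = true → argInt z < 0) ∧
    (argInt z = -1 → (Word.ofBV (Word.part .w32 z)).toNat % 2 ^ 32 = 0xFFFFFFFF) := by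
  have e1 : (Word.ofBV (Word.part .w32 z)).toNat % 2 ^ 32 = z.toNat % 2 ^ 32 := by
    rw [Vorbis.toNat_ofBV32, Vorbis.toNat_part32, Nat.mod_mod]
  have hm : (Word.part .w32 z).msb = decide (2 ^ 31 ≤ z.toNat % 2 ^ 32) := by
    rw [BitVec.msb_eq_decide, Vorbis.toNat_part32]
    rfl
  have hlt : z.toNat % 2 ^ 32 < 2 ^ 32 := Nat.mod_lt _ (by decide)
  have hc := sint32_cases (z.toNat % 2 ^ 32)
  refine ⟨?_, ?_, ?_, ?_⟩
  · unfold argInt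
    rw [e1]
  · intro h
    rw [hm] at h
    have : ¬ 2 ^ 31 ≤ z.toNat % 2 ^ 32 := by
      simpa using h
    unfold argInt
    omega
  · intro h
    rw [hm] at h
    have : 2 ^ 31 ≤ z.toNat % 2 ^ 32 := by
      simpa using h
    unfold argInt
    omega
  · intro h
    rw [e1]
    unfold argInt at h
    omega



/-- The segment's footprint after stores into the callee area of the own frame and into `acc` / `valid_bits` of `*f`. -/
theorem seg3b_same {u : State} {m0 m1 m2 : Mem} (h : Mem.SameExcept (seg3Wins u) m0 m1)
    (hs : Mem.SameExcept [⟨(u.reg .rsp).toNat - 3856, (u.reg .rsp).toNat - 2992⟩, ⟨fOf u + 1752, fOf u + 1784⟩] m1 m2) :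
    Mem.SameExcept (seg3Wins u) m0 m2 := by
  apply h.step_same hs
  intro w hw a k1 k2
  simp only [List.mem_cons, List.mem_nil_iff, or_false] at hw
  rcases hw with rfl | rfl
  · exact ⟨_, by simp only [seg3Wins, List.mem_cons, true_or], k1, k2⟩
  · exact ⟨_, by simp only [seg3Wins, List.mem_cons, List.mem_nil_iff, true_or, or_true], k1, k2⟩

/-- **DECODE_RAW, inline** (0x110f3b … 0x110fbc, 0x110c6a … 0x110c8d): the fast path through `fast_huffman` (K5) and
`codeword_lengths` (K3), with `acc >>= len`, `valid_bits -= len` (reset to 0 and `var = −1` when negative), or the call of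
codebook_decode_scalar_raw. Ends at the join 0x110fc2 with `r12d = var`, a DECODE_RAW result. -/
theorem decode_raw (Lay : Layout) (hLay : Lay.hi = 0x1000000) (μ : Microarch) (hμ : UserX.MicroOK μ) (u₀ : State)
    (hcode : HasCodeNat Lay u₀ Vorbis.L.vorbis_decode_packet_rest.entry Vorbis.Code.code_vorbis_decode_packet_rest.nat
      Vorbis.L.vorbis_decode_packet_rest.size)
    (h_raw : ∀ (others : List Obj) (frames : List (Nat × FrameLayout)) (Blk : Block → Prop) (len : Nat),
      Calls Lay μ Vorbis.WayInv (Vorbis.conv u₀) Vorbis.L.codebook_decode_scalar_raw.entry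
        (Vorbis.Spec.codebook_decode_scalar_raw.spec others frames Blk len))
    (hl1 : Asan.SmallCheck Lay μ Vorbis.WayInv (Vorbis.CodeOK u₀) [.rax, .rdx] 1 Vorbis.L.__asan_load1_noabort.entry)
    (hl8 : Asan.SmallCheck Lay μ Vorbis.WayInv (Vorbis.CodeOK u₀) [.rax, .rcx, .rdx] 8 Vorbis.L.__asan_load8_noabort.entry)
    (hl4 : Asan.SmallCheck Lay μ Vorbis.WayInv (Vorbis.CodeOK u₀) [.rax, .rcx, .rdx] 4 Vorbis.L.__asan_load4_noabort.entry)
    (hl2 : Asan.SmallCheck Lay μ Vorbis.WayInv (Vorbis.CodeOK u₀) [.rax, .rcx, .rdx] 2 Vorbis.L.__asan_load2_noabort.entry)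
    (others : List Obj) (frames : List (Nat × FrameLayout)) (len : Nat) (Ar : Arena) (stored room : Int)
    (mode : Nat) (ysz : Nat → Nat) (u : State) (ret : Word) (i j : Nat) (v : State)
    (hat : At3 u₀ others frames len Ar stored room mode ysz u ret i j v) (g pc mb : Nat) (m : State)
    (hmb : (mb : Int) < stb_vorbis.codebook_count v.mem (fOf u))
    (hmid : At3Mid u₀ u v (RunBlk Ar len) len g pc (stb_vorbis.codebooks_at v.mem (fOf u) mb)
      Vorbis.L.vorbis_decode_packet_rest.at_110f3b m) :
    ReachVia Lay μ Vorbis.WayInv m (fun w =>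
      At3Mid u₀ u v (RunBlk Ar len) len g pc (stb_vorbis.codebooks_at v.mem (fOf u) mb)
        Vorbis.L.vorbis_decode_packet_rest.at_110fc2 w ∧
      DecodeRawResult v.mem (stb_vorbis.codebooks_at v.mem (fOf u) mb) (s32 (w.reg .r12))) := by
  have he := hat.entry
  v_entry he
  clear he_eq
  have hst := hat.toStable
  have hinv := hst.inv
  have hshadow := hst.shadow
  have hlive := hinv.live
  obtain ⟨w_rip, hm_rsp, hmrbp, hmr15, hm_r13, w_eq, habi, hsm, hunm, hbm, slots⟩ := hmid
  have hdf : m.flags .df = false := (show abiInv _ from habi).1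
  have hmx : m.mxcsr &&& 0x1F80 = 0x1F80 := (show abiInv _ from habi).2
  have hsse := Vorbis.sseOK_of_abiInv habi
  have hraw := h_raw others (framesIn frames u) (RunBlk Ar len) len
  generalize hc : stb_vorbis.codebooks_at v.mem (fOf u) mb = c at *
  have hm_rbp : m.reg .rbp = addr (fOf u) := by
    rw [hmrbp]
    exact eq_addr _ _ hat.rbp
  have hv_rbp : v.reg .rbp = addr (fOf u) := eq_addr _ _ hat.rbp
  clear hmrbp
  -- the codebook
  have hcbA := hinv.fb.vorbis.codebooks
  have hcbok : CodebookOK (RunBlk Ar len) v.mem c := by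
    rw [← hc]
    exact hcbA.ok mb (by omega)
  obtain ⟨B, hB, hin⟩ := CodebooksUpTo.book_in (groups_laws len) hcbA hmb
  rw [hc] at hin
  have hap : BookApart v.mem (fOf u) c := by
    rw [← hc]
    exact hinv.books mb hmb
  have hBoff := hinv.offStack B hB
  have hBin := hinv.ok.inside B hB
  have hfin := hbm.OBR
  have hfoff := hinv.objOff
  have hapb := hap.book
  simp only [vblock, voff] at hin hfin hfoff hapb hBin
  have rd : ∀ (off n : Nat), off + n ≤ 2120 → m.mem.readLE (addr (c + off)) n = v.mem.readLE (addr (c + off)) n := by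
    intro off n ho
    have ea : (addr (c + off)).toNat = c + off := toNat_addr _ (by omega)
    apply hsm.readLE _ n (by rw [ea]; omega)
    intro s hs
    have := seg3Wins_mem hs
    rw [ea]
    omega
  have hok := hinv.ok
  have hcov := hinv.fb.env.covers
  have eF3 : addr (fOf u) + 1764 = addr (fOf u + 1764) := addr_add_lit (fOf u) 1764
  have eF2 : addr (fOf u) + 1768 = addr (fOf u + 1768) := addr_add_lit (fOf u) 1768
  have hT7 : (addr (fOf u + 1764)).toNat = fOf u + 1764 := toNat_addr _ (by omega)
  have hT6 : (addr (fOf u + 1768)).toNat = fOf u + 1768 := toNat_addr _ (by omega)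
  have hT0 : (addr (fOf u)).toNat = fOf u := toNat_addr _ (by omega)
  have eC8 : addr c + 8 = addr (c + 8) := addr_add_lit c 8
  have hTc8 : (addr (c + 8)).toNat = c + 8 := toNat_addr _ (by omega)
  have hTc : (addr c).toNat = c := toNat_addr _ (by omega)
  obtain ⟨A, hA⟩ : ∃ A : Nat, m.mem.readLE (addr (fOf u + 1764)) 4 = A := ⟨_, rfl⟩
  obtain ⟨VB, hVB⟩ : ∃ VB : Nat, m.mem.readLE (addr (fOf u + 1768)) 4 = VB := ⟨_, rfl⟩
  have L8 : m.mem.readLE (addr (c + 8)) 8 = Codebook.codeword_lengths v.mem c := rd 8 8 (by omega)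
  have eK := fast_huffman_addr c A
  have hk1024 : A % 1024 < 1024 := Nat.mod_lt _ (by decide)
  generalize hk : A % 1024 = k at *
  have hTk : (addr (c + 48 + 2 * k)).toNat = c + 48 + 2 * k := toNat_addr _ (by omega)
  obtain ⟨FH, hFH⟩ : ∃ FH : Nat, v.mem.readLE (addr (c + 48 + 2 * k)) 2 = FH := ⟨_, rfl⟩
  have LK : m.mem.readLE (addr (c + 48 + 2 * k)) 2 = FH := by
    rw [← hFH, Nat.add_assoc c 48]
    exact rd (48 + 2 * k) 2 (by omega)
  have hFHlt : FH < 65536 := by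
    rw [← hFH]
    exact Mem.readLE_lt' v.mem _ 2
  have hfh : Codebook.fast_huffman v.mem c k = sint16 FH := by
    simp only [vacc, voff]
    unfold Mem.i16 Mem.u16
    rw [hFH]
  have hsp_top : (spOf u).toNat = (u.reg .rsp).toNat - 3000 := by
    show (u.reg .rsp - 3000).toNat = _
    u_omega
  generalize hCL : Codebook.codeword_lengths v.mem c = CL at *
  u_walk hcode [hμ.vendor, eF2, eF3, eC8, eK] until [Vorbis.L.vorbis_decode_packet_rest.at_110fc2, Vorbis.L.vorbis_decode_packet_rest.ret32] span [Vorbis.L.textLo, Vorbis.L.textHi] side (v_side)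
  case check_110f42 =>
    -- load4 `f->acc`
    have hun : ShadowUntouched m.mem s_110f42.mem := by v_untouched
    have hs := hinv.fb.vorbis.bits.site_field hlive 1764 4 (by omega) (by omega) (a := fOf u + 1764) rfl
    exact check_site hshadow (Mem.EqOn.trans hunm hun) hs hT7
  case check_110f60 =>
    -- load2 `c->fast_huffman[acc & 1023]`: inside the struct at `c`
    have hun : ShadowUntouched m.mem s_110f60.mem := by v_untouched
    have hs := Codebook.site_field hlive hB (by simp only [vblock]; exact hin) (48 + 2 * k) 2 (by simp only [voff]; omega) (by omega)
      (a := c + 48 + 2 * k) (by omega)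
    exact check_site hshadow (Mem.EqOn.trans hunm hun) hs hTk
  case check_110f7c =>
    -- load8 `c->codeword_lengths`
    have hun : ShadowUntouched m.mem s_110f7c.mem := by v_untouched
    have hs := Codebook.site_field hlive hB (by simp only [vblock]; exact hin) 8 8 (by simp only [voff]; omega) (by omega)
      (a := c + 8) rfl
    exact check_site hshadow (Mem.EqOn.trans hunm hun) hs hTc8
  case call_inv => v_inv
  case pre_110c85 =>
    -- `BookPre`: only a return address was pushed since the join
    have h2 : ShadowUntouched m.mem s_110c85.mem := by v_untouched
    have hun' : ShadowUntouched v.mem s_110c85.mem := Mem.EqOn.trans hunm h2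
    have hsame' : Mem.SameExcept (seg3Wins u) v.mem s_110c85.mem := by
      rw [w_mem]
      exact seg3Wins_push hsm _ _ _ (by u_omega) (by u_omega)
    have hkeep := Vorbis.Spec.Reader.store_off_obj hbm (u.reg .rsp - 3008) 8 1117322 (by u_omega) (by u_omega)
    rw [← w_mem] at hkeep
    have hinv' := seg3_inv_step hst hsame' hun' hkeep.1.bits
    have hsh' : ShadowPre others (framesIn frames u) s_110c85 := by
      refine ⟨?_, hst.pre.1.offText⟩
      have e : (s_110c85.reg .rsp).toNat + 8 = (spOf u).toNat := by
        rw [w_rsp]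
        show (u.reg .rsp - 3008).toNat + 8 = (u.reg .rsp - 3000).toNat
        u_omega
      rw [e]
      exact hst.shadow.untouched hun'
    have erdi : (s_110c85.reg .rdi).toNat = fOf u := by
      rw [w_rdi]
      exact hT0
    have hE := config_eqOn hst hsame'
    have ecount : stb_vorbis.codebook_count s_110c85.mem (fOf u) = stb_vorbis.codebook_count v.mem (fOf u) := by
      simp only [vacc, voff]
      apply hE.i32 <;> omega
    have ecb : stb_vorbis.codebooks_at s_110c85.mem (fOf u) mb = stb_vorbis.codebooks_at v.mem (fOf u) mb := by
      have e1 : s_110c85.mem.u64 (fOf u + 168) = v.mem.u64 (fOf u + 168) := by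
        apply hE.u64 <;> omega
      simp only [vacc, voff]
      rw [e1]
    have hinv'' : DecodeInv others (framesIn frames u) len Ar stored room ysz s_110c85.mem (s_110c85.reg .rdi).toNat := by
      rw [erdi]
      exact hinv'
    refine Vorbis.Spec.PacketRestTest.bookPre_of_inv s_110c85 mb hsh' hinv'' ?_ ?_
    · rw [erdi, ecount]
      exact hmb
    · rw [erdi, w_rsi, hTc, ecb, hc]
  · -- the slow path, after `codebook_decode_scalar_raw(f, c)` (0x110c8a): `mov r12d, eax ; jmp 110fc2`
    have c_rdi : (s_110c85.reg .rdi).toNat = fOf u := by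
      rw [w_rdi_110c85]
      exact hT0
    have hp : ScalarRawPost (RunBlk Ar len) len s_110c85 s_110c85r := w_post
    have w_eq := Vorbis.conv_code_eqOn w_code
    simp only [X86.User.Spec.footprint, vspec, w_rsp_110c85, w_rdi_110c85, hT0] at w_same
    have h2 : ShadowUntouched m.mem s_110c85.mem := by
      rw [w_mem_110c85]
      v_untouched
    have hunr : ShadowUntouched v.mem s_110c85r.mem := Mem.EqOn.trans (Mem.EqOn.trans hunm h2) hp.untouched
    have hsame' : Mem.SameExcept (seg3Wins u) v.mem s_110c85.mem := by
      rw [w_mem_110c85]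
      exact seg3Wins_push hsm _ _ _ (by u_omega) (by u_omega)
    have hsamer : Mem.SameExcept (seg3Wins u) v.mem s_110c85r.mem :=
      seg3Wins_through_callee hsame' w_same (by u_omega) (by u_omega)
    have hdfr : s_110c85r.flags .df = false := (show X86.User.abiInv _ from w_inv).1
    have hmxr : s_110c85r.mxcsr &&& 8064 = 8064 := (show X86.User.abiInv _ from w_inv).2
    have hsser := Vorbis.sseOK_of_abiInv w_inv
    have hbr : Bits (RunBlk Ar len) len s_110c85r.mem (fOf u) := by
      have hb := hp.reader.bits
      rw [c_rdi] at hb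
      exact hb
    have hslr : Head3Slots u v s_110c85r g pc :=
      slots.through w_mem_110c85 (by u_omega) w_same (by u_omega) he_room he_top hfoff
    have hr_rbp : s_110c85r.reg .rbp = v.reg .rbp := by
      rw [w_kept .rbp rfl, hm_rbp, hv_rbp]
    have hr_r15 : s_110c85r.reg .r15 = v.reg .r15 := by
      rw [w_kept .r15 rfl]
      exact hmr15
    have hr_r13 : s_110c85r.reg .r13 = addr c := by
      rw [w_kept .r13 rfl]
      exact hm_r13
    have hr_rsp := w_rsp
    -- the result, over the memory of the segment's entry
    have hres := hp.result
    rw [w_rsi_110c85, hTc] at hres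
    have hsf : Codebook.SameFields v.mem s_110c85.mem c := by
      apply Codebook.SameFields.of_sameExcept_off hsame' (by omega)
      intro w hw
      have := seg3Wins_mem hw
      omega
    have hN := hsf.N
    obtain ⟨z, w_rax⟩ : ∃ z, s_110c85r.reg .rax = z := ⟨_, rfl⟩
    rw [w_rax] at hres
    clear w_kept w_same
    u_walk hcode [hμ.vendor] until [Vorbis.L.vorbis_decode_packet_rest.at_110fc2] span [Vorbis.L.textLo, Vorbis.L.textHi] side (v_side)
    refine ReachVia.done ⟨⟨?_, ?_, ?_, ?_, ?_, w_eq, ?_, ?_, ?_, ?_, ?_⟩, ?_⟩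
    · rw [w_rip]
    · rw [w_kept .rsp rfl]
      exact hr_rsp
    · rw [w_kept .rbp rfl]
      exact hr_rbp
    · rw [w_kept .r15 rfl]
      exact hr_r15
    · rw [w_kept .r13 rfl]
      exact hr_r13
    · v_inv
    · rw [w_mem]
      exact hsamer
    · rw [w_mem]
      exact hunr
    · rw [w_mem]
      exact hbr
    · exact hslr.of_mem_eq w_mem
    · rw [s32_eq_argInt, w_r12, (result_sign z).1]
      unfold DecodeRawResult at hres ⊢
      rw [hN] at hres
      exact hres
  · -- the fast path: `fast_huffman[k] = FH ≥ 0`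
    obtain ⟨hH15, hs16, e64, e32⟩ := (fast_entry FH hFHlt).1 hbr_110f72
    have hfh0 : 0 ≤ Codebook.fast_huffman v.mem c k := by
      rw [hfh, hs16]
      omega
    have hsL : Site (LiveSet others (framesIn frames u)) (CL + FH) 1 := by
      have h0 := hcbok.site_lengths_of_fast hlive k hk1024 hfh0 rfl
      rw [hfh, hs16] at h0
      rw [← hCL]
      exact h0
    have hwL := site_where hshadow hst.pre.1.offText (by rw [hsp_top]; omega) hsL
    rw [hsp_top] at hwL
    have eL : addr FH + UInt64.ofNat CL = addr (CL + FH) := by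
      rw [show UInt64.ofNat CL = addr CL from rfl, addr_add_addr, Nat.add_comm FH CL]
    have hTL : (addr (CL + FH)).toNat = CL + FH := toNat_addr _ (by omega)
    obtain ⟨LEN, hLEN⟩ : ∃ LEN : Nat, m.mem.readLE (addr (CL + FH)) 1 = LEN := ⟨_, rfl⟩
    have hLEN256 : LEN < 256 := by
      rw [← hLEN]
      exact Mem.readLE_lt' m.mem _ 1
    u_walk hcode [hμ.vendor, eF2, eF3, eC8, e64, eL] until [Vorbis.L.vorbis_decode_packet_rest.at_110fc2] span [Vorbis.L.textLo, Vorbis.L.textHi] side (v_side)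
    case check_110f8c =>
      -- load1 `c->codeword_lengths[FH]`: `0 ≤ FH < N(c)` (K5), inside the lengths block (K3)
      have hun : ShadowUntouched m.mem s_110f8c.mem := by v_untouched
      exact check_site hshadow (Mem.EqOn.trans hunm hun) hsL hTL
    case check_110fa9 =>
      -- load4 `f->valid_bits`
      have hun : ShadowUntouched m.mem s_110fa9.mem := by v_untouched
      have hs := hinv.fb.vorbis.bits.site_field hlive 1768 4 (by omega) (by omega) (a := fOf u + 1768) rfl
      exact check_site hshadow (Mem.EqOn.trans hunm hun) hs hT6
    · -- `valid_bits` went negative: `valid_bits = 0 ; var = −1`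
      have h2 : Mem.SameExcept [⟨(u.reg .rsp).toNat - 3856, (u.reg .rsp).toNat - 2992⟩, ⟨fOf u + 1752, fOf u + 1784⟩]
          m.mem s_110c7a.mem := by
        u_same
      have hun2 : ShadowUntouched m.mem s_110c7a.mem := by v_untouched
      have k1 := Vorbis.Spec.BitReader.stack_store hbm (u.reg .rsp - 3008) 1118097 (by u_omega) (by u_omega)
      have k2 := Vorbis.Spec.BitReader.acc_store k1.1 (BitVec.ofNat 32 A >>> ((BitVec.setWidth 8 (BitVec.zeroExtend 32 (BitVec.ofNat 8 LEN))).toNat % 32)).toNat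
      have k3 := Vorbis.Spec.BitReader.stack_store k2.1 (u.reg .rsp - 3008) 1118126 (by u_omega) (by u_omega)
      have k4 := Vorbis.Spec.BitReader.vb_store k3.1 0#32 (by decide)
      have hb : Bits (RunBlk Ar len) len s_110c7a.mem (fOf u) := by
        rw [w_mem]
        exact k4.1
      refine ReachVia.done ⟨⟨w_rip, w_rsp, ?_, ?_, ?_, w_eq, ?_, seg3b_same hsm h2, Mem.EqOn.trans hunm hun2, hb, ⟨?_, ?_, ?_, ?_⟩⟩, ?_⟩
      · rw [w_kept.get .rbp rfl, hm_rbp, hv_rbp]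
      · rw [w_kept.get .r15 rfl]
        exact hmr15
      · rw [w_kept.get .r13 rfl]
        exact hm_r13
      · v_inv
      · u_frame slots.s38
      · u_frame slots.s10
      · u_frame slots.s2c
      · u_frame slots.s30
      · left
        rw [w_r12]
        decide
    · -- the bits are consumed: `var = FH`
      have hV1 := hbm.V1
      have hmI := vb_toInt m.mem (fOf u) VB (by rw [eF2]; exact hVB)
      have h2 : Mem.SameExcept [⟨(u.reg .rsp).toNat - 3856, (u.reg .rsp).toNat - 2992⟩, ⟨fOf u + 1752, fOf u + 1784⟩]
          m.mem s_110fbc.mem := by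
        u_same
      have hun2 : ShadowUntouched m.mem s_110fbc.mem := by v_untouched
      have k1 := Vorbis.Spec.BitReader.stack_store hbm (u.reg .rsp - 3008) 1118097 (by u_omega) (by u_omega)
      have k2 := Vorbis.Spec.BitReader.acc_store k1.1 (BitVec.ofNat 32 A >>> ((BitVec.setWidth 8 (BitVec.zeroExtend 32 (BitVec.ofNat 8 LEN))).toNat % 32)).toNat
      have k3 := Vorbis.Spec.BitReader.stack_store k2.1 (u.reg .rsp - 3008) 1118126 (by u_omega) (by u_omega)
      have k4 := Vorbis.Spec.BitReader.vb_store k3.1 (BitVec.ofNat 32 VB - BitVec.zeroExtend 32 (BitVec.setWidth 8 (BitVec.zeroExtend 32 (BitVec.ofNat 8 LEN)))) (vb_sub_V1 _ _ (by rw [hmI]; exact hV1) hbr_110fbc)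
      have hb : Bits (RunBlk Ar len) len s_110fbc.mem (fOf u) := by
        rw [w_mem]
        exact k4.1
      refine ReachVia.done ⟨⟨w_rip, w_rsp, ?_, ?_, ?_, w_eq, ?_, seg3b_same hsm h2, Mem.EqOn.trans hunm hun2, hb, ⟨?_, ?_, ?_, ?_⟩⟩, ?_⟩
      · rw [w_kept.get .rbp rfl, hm_rbp, hv_rbp]
      · rw [w_kept.get .r15 rfl]
        exact hmr15
      · rw [w_kept.get .r13 rfl]
        exact hm_r13
      · v_inv
      · u_frame slots.s38
      · u_frame slots.s10
      · u_frame slots.s2c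
      · u_frame slots.s30
      · have hz : argInt (s_110fbc.reg .r12) = (FH : Int) := by
          rw [w_r12, e32]
          unfold argInt sint32
          rw [toNat_addr _ (by omega)]
          have e1 : FH % 2 ^ 32 = FH := Nat.mod_eq_of_lt (by omega)
          rw [e1, if_pos (by omega)]
        rw [s32_eq_argInt, hz]
        have hr := hcbok.decodeRaw_fast k hk1024
        rw [hfh, hs16] at hr
        exact hr

end Vorbis.Spec.vorbis_decode_packet_rest_3b
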